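-- pv_equiv track=rewrite | github.com/ocirne/adventofcode | python/src/aoc/year2016/day14.py | find_three
-- ===== SOURCE A (Python) =====
-- REP = {5 * hex(i)[2:]: 3 * hex(i)[2:] for i in range(16)}
--
-- def find_three(md5_hash):
--     lowest_index = 100
--     for three in REP.values():
--         f = md5_hash.find(three)
--         if f >= 0:
--             if lowest_index > f:
--                 result = three
--                 lowest_index = f
--     if lowest_index == 100:
--         return None
--     return result
-- ===== SOURCE B (Python) =====
-- def find_three(md5_hash):
--     for i in range(len(md5_hash) - 2):
--         c = md5_hash[i]
--         if c == md5_hash[i + 1] == md5_hash[i + 2] and c in "0123456789abcdef":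
--             return 3 * c
--     return None
-- ===== Notes on version B (the rewrite author's own statement) =====
-- stated objective: simpler
-- what changed: B replaces A's 16 separate .find scans (one per hex digit) with min-index bookkeeping by one left-to-right positional sweep that returns the leftmost hex triple directly.
-- intended difference: On strings whose earliest hex triple starts at index >= 100 (none earlier), A returns None because of its hard-coded sentinel lowest_index = 100, while B returns that triple, which is the intended 'earliest triple' answer. — e.g. on find_three("xyxyxyxyxyxyxyxyxyxyxyxyxyxyxyxyxyxyxyxyxyxyxyxyxyxyxyxyxyxyxyxyxyxyxyxyxyxyxyxyxyxyxyxyxyxyxyxyxyxyaaa"): A returns none, B returns some "aaa"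
import Mathlib
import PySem

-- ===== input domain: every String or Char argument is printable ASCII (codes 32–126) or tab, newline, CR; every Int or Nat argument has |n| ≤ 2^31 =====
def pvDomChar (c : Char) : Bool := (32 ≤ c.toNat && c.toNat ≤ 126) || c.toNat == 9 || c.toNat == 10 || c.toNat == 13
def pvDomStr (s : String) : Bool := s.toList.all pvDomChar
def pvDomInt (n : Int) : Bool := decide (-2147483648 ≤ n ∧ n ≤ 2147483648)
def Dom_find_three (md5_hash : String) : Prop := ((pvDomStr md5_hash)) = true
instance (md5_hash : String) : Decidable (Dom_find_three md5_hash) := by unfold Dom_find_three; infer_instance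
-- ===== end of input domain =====

-- B replaces A's 16 per-digit .find scans with one left-to-right sweep returning the leftmost hex triple (simpler);
-- A returns None when the earliest triple starts at index >= 100 (its sentinel), B returns that triple — stated as D_ below.


-- ===== PORT A =====
-- REP = {5*h : 3*h for h in hex digits}; the loop iterates REP.values() in insertion order
def pvTriples : List String :=
  ["000","111","222","333","444","555","666","777","888","999","aaa","bbb","ccc","ddd","eee","fff"]

def pvStepA (s : String) (st : Int × Option String) (three : String) : Int × Option String :=
  let f := PySem.Str.find s three
  if 0 ≤ f then (if st.1 > f then (f, some three) else st) else st

def find_three (md5_hash : String) : Option String :=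
  let st := pvTriples.foldl (pvStepA md5_hash) (100, none)
  if st.1 = 100 then none else st.2

-- ===== PORT B =====
-- single left-to-right sweep over the characters; 'c in "0123456789abcdef"'
def pvScanB : List Char → Option String
  | a :: b :: c :: rest =>
      if a = b ∧ b = c ∧ PySem.Chars.isIn [a] ("0123456789abcdef".toList) then
        some (String.ofList [a, a, a])
      else pvScanB (b :: c :: rest)
  | _ => none

def find_three_alt (md5_hash : String) : Option String := pvScanB md5_hash.toList

-- ===== PRECONDITION & SPEC =====
-- helpers for D_ (independent of both ports)
def pvHexChar (c : Char) : Bool := ("0123456789abcdef".toList).contains c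
def pvTripAt (l : List Char) (i : Nat) : Bool :=
  match l.drop i with
  | [] => false
  | [_] => false
  | [_, _] => false
  | a :: b :: c :: _ => a == b && b == c && pvHexChar a

-- On strings whose earliest hex triple starts at index ≥ 100, A returns None (its sentinel lowest_index = 100),
-- B returns that triple, which is the intended 'earliest triple' answer.
def D_find_three (md5_hash : String) : Prop :=
  (∀ i < 100, pvTripAt md5_hash.toList i = false) ∧
  (∃ i, i < md5_hash.toList.length ∧ 100 ≤ i ∧ pvTripAt md5_hash.toList i = true)
instance (md5_hash : String) : Decidable (D_find_three md5_hash) := by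
  unfold D_find_three; infer_instance

def Spec_find_three (md5_hash : String) (out : Option String) : Prop :=
  ¬ D_find_three md5_hash → out = find_three_alt md5_hash
instance (md5_hash : String) (out : Option String) : Decidable (Spec_find_three md5_hash out) := by
  unfold Spec_find_three; infer_instance

def pvDiffWitness_find_three : String :=
  "xyxyxyxyxyxyxyxyxyxyxyxyxyxyxyxyxyxyxyxyxyxyxyxyxyxyxyxyxyxyxyxyxyxyxyxyxyxyxyxyxyxyxyxyxyxyxyxyxyxyaaa"
def pvDiffWitnessOut_find_three : (Option String) × (Option String) := (none, some "aaa")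

-- ===== CLAIM =====
def Claim_unchanged_find_three : Prop :=
  ∀ (md5_hash : String), Dom_find_three md5_hash → Spec_find_three md5_hash (find_three md5_hash)
def Claim_changed_find_three : Prop :=
  Dom_find_three (pvDiffWitness_find_three) ∧ D_find_three (pvDiffWitness_find_three) ∧
  find_three (pvDiffWitness_find_three) = pvDiffWitnessOut_find_three.1 ∧
  find_three_alt (pvDiffWitness_find_three) = pvDiffWitnessOut_find_three.2 ∧
  pvDiffWitnessOut_find_three.1 ≠ pvDiffWitnessOut_find_three.2
def Claim_exact_find_three : Prop :=
  ∀ (md5_hash : String), Dom_find_three md5_hash → D_find_three md5_hash →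
    find_three md5_hash ≠ find_three_alt md5_hash

-- ===== LEMMAS AND PROOFS =====

theorem pvTripAt_zero (a b c : Char) (rest : List Char) :
    pvTripAt (a :: b :: c :: rest) 0 = (a == b && b == c && pvHexChar a) := rfl

theorem pvTripAt_succ (x : Char) (l : List Char) (i : Nat) :
    pvTripAt (x :: l) (i + 1) = pvTripAt l i := rfl

theorem trip_short (l : List Char) (i : Nat) (h : l.length < 3) : pvTripAt l i = false := by
  unfold pvTripAt
  rcases hd : l.drop i with _ | ⟨a, _ | ⟨b, _ | ⟨c, r⟩⟩⟩ <;> try rfl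
  exfalso
  have h1 : (l.drop i).length ≤ l.length := by
    rw [List.length_drop]; omega
  rw [hd] at h1
  simp at h1
  omega

theorem isIn_hex (a : Char) :
    PySem.Chars.isIn [a] ("0123456789abcdef".toList) = true ↔ pvHexChar a = true := by
  rw [PySem.Chars.isIn_iff_infix]
  constructor
  · rintro ⟨p, q, hp⟩
    have hm : a ∈ "0123456789abcdef".toList := by rw [← hp]; simp
    simpa [pvHexChar] using hm
  · intro h
    have hm : a ∈ "0123456789abcdef".toList := by simpa [pvHexChar] using h
    obtain ⟨p, q, hpq⟩ := List.append_of_mem hm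
    exact ⟨p, q, by rw [hpq]; simp⟩

theorem cond_iff_trip (a b c : Char) (rest : List Char) :
    (a = b ∧ b = c ∧ PySem.Chars.isIn [a] ("0123456789abcdef".toList) = true) ↔
    pvTripAt (a :: b :: c :: rest) 0 = true := by
  rw [pvTripAt_zero]
  simp only [Bool.and_eq_true, beq_iff_eq, and_assoc]
  constructor
  · rintro ⟨h1, h2, h3⟩
    exact ⟨h1, h2, (isIn_hex a).mp h3⟩
  · rintro ⟨h1, h2, h3⟩
    exact ⟨h1, h2, (isIn_hex a).mpr h3⟩

-- tripAt as an existential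
theorem pvTripAt_iff (l : List Char) (i : Nat) :
    pvTripAt l i = true ↔ ∃ c, pvHexChar c = true ∧ [c, c, c] <+: l.drop i := by
  unfold pvTripAt
  rcases h : l.drop i with _ | ⟨a, _ | ⟨b, _ | ⟨c, rest⟩⟩⟩
  · simp
  · simp
  · simp
  · simp only [Bool.and_eq_true, beq_iff_eq, List.cons_prefix_cons]
    constructor
    · rintro ⟨⟨h1, h2⟩, h3⟩
      exact ⟨a, h3, rfl, by rw [h1], by rw [h1, h2], List.nil_prefix⟩
    · rintro ⟨d, hd, h1, h2, h3, -⟩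
      subst h1; subst h2; subst h3
      exact ⟨⟨rfl, rfl⟩, hd⟩

-- fold lemma: no update possible
theorem foldA_none (s : String) (ts : List String) (li : Int) (res : Option String)
    (h : ∀ t ∈ ts, ¬ (0 ≤ PySem.Str.find s t ∧ PySem.Str.find s t < li)) :
    ts.foldl (pvStepA s) (li, res) = (li, res) := by
  induction ts with
  | nil => rfl
  | cons t ts ih =>
    have hstep : pvStepA s (li, res) t = (li, res) := by
      simp only [pvStepA]
      split_ifs with h1 h2
      · exact absurd ⟨h1, h2⟩ (h t List.mem_cons_self)
      · rfl
      · rfl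
    simp only [List.foldl_cons, hstep]
    exact ih (fun u hu => h u (List.mem_cons_of_mem _ hu))

-- fold lemma: a unique minimum wins
theorem foldA_min (s : String) (ts : List String) (li : Int) (res : Option String) (t0 : String)
    (hmem : t0 ∈ ts) (h0 : 0 ≤ PySem.Str.find s t0) (hlt : PySem.Str.find s t0 < li)
    (hmin : ∀ t ∈ ts, 0 ≤ PySem.Str.find s t → PySem.Str.find s t0 ≤ PySem.Str.find s t)
    (hinj : ∀ t ∈ ts, PySem.Str.find s t = PySem.Str.find s t0 → t = t0) :
    ts.foldl (pvStepA s) (li, res) = (PySem.Str.find s t0, some t0) := by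
  revert hmem hlt hmin hinj
  induction ts generalizing li res with
  | nil => intro hmem _ _ _; cases hmem
  | cons t ts ih =>
    intro hmem hlt hmin hinj
    simp only [List.foldl_cons]
    by_cases hup : 0 ≤ PySem.Str.find s t ∧ li > PySem.Str.find s t
    · have hstep : pvStepA s (li, res) t = (PySem.Str.find s t, some t) := by
        simp only [pvStepA]; rw [if_pos hup.1, if_pos hup.2]
      rw [hstep]
      by_cases heq : PySem.Str.find s t = PySem.Str.find s t0
      · have ht : t = t0 := hinj t (List.mem_cons_self) heq
        subst ht
        exact foldA_none s ts (PySem.Str.find s t) (some t)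
          (fun u hu hc => absurd (hmin u (List.mem_cons_of_mem _ hu) hc.1) (not_le.mpr hc.2))
      · have hlt2 : PySem.Str.find s t0 < PySem.Str.find s t :=
          lt_of_le_of_ne (hmin t (List.mem_cons_self) hup.1) (Ne.symm heq)
        have hmem' : t0 ∈ ts := by
          rcases List.mem_cons.mp hmem with h | h
          · exact (heq (by rw [h])).elim
          · exact h
        exact ih _ _ hmem' hlt2 (fun u hu h0u => hmin u (List.mem_cons_of_mem _ hu) h0u)
          (fun u hu he => hinj u (List.mem_cons_of_mem _ hu) he)
    · have hstep : pvStepA s (li, res) t = (li, res) := by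
        simp only [pvStepA]
        split_ifs with h1 h2
        · exact absurd ⟨h1, h2⟩ hup
        · rfl
        · rfl
      rw [hstep]
      have hmem' : t0 ∈ ts := by
        rcases List.mem_cons.mp hmem with h | h
        · subst h; exact absurd ⟨h0, hlt⟩ hup
        · exact h
      exact ih _ _ hmem' hlt (fun u hu h0u => hmin u (List.mem_cons_of_mem _ hu) h0u)
        (fun u hu he => hinj u (List.mem_cons_of_mem _ hu) he)

-- B's scan: none iff no triple anywhere
theorem pvScanB_none_iff (l : List Char) :
    pvScanB l = none ↔ ∀ i, pvTripAt l i = false := by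
  fun_induction pvScanB l with
  | case1 a b c rest hcond =>
    constructor
    · intro h; cases h
    · intro h
      have h0 := h 0
      have := (cond_iff_trip a b c rest).mp hcond
      rw [h0] at this; cases this
  | case2 a b c rest hcond ih1 =>
    constructor
    · intro h i
      cases i with
      | zero =>
        have hne : ¬ pvTripAt (a :: b :: c :: rest) 0 = true :=
          fun ht => hcond ((cond_iff_trip a b c rest).mpr ht)
        simpa using hne
      | succ j =>
        rw [pvTripAt_succ]
        exact (ih1.mp h) j
    · intro h
      exact ih1.mpr (fun i => by rw [← pvTripAt_succ a]; exact h (i + 1))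
  | case3 t hnm =>
    constructor
    · intro _ i
      have hlen : t.length < 3 := by
        rcases t with _ | ⟨a, _ | ⟨b, _ | ⟨c, r⟩⟩⟩
        · simp
        · simp
        · simp
        · exact absurd rfl (fun h => hnm a b c r h)
      exact trip_short t i hlen
    · intro _; rfl

-- B's scan: a some result gives a first triple index
theorem pvScanB_some (l : List Char) (r : String) (h : pvScanB l = some r) :
    ∃ i c, pvHexChar c = true ∧ [c, c, c] <+: l.drop i ∧ r = String.ofList [c, c, c] ∧
      ∀ j < i, pvTripAt l j = false := by
  revert h
  fun_induction pvScanB l with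
  | case1 a b c rest hcond =>
    intro h
    obtain ⟨h1, h2, h3⟩ := hcond
    subst h1; subst h2
    refine ⟨0, a, (isIn_hex a).mp h3, ?_, ?_, by omega⟩
    · simp [List.cons_prefix_cons]
    · exact (Option.some_injective _ h).symm
  | case2 a b c rest hcond ih1 =>
    intro h
    obtain ⟨i, c0, hx, hp, hr, hmin⟩ := ih1 h
    refine ⟨i + 1, c0, hx, hp, hr, ?_⟩
    intro j hj
    cases j with
    | zero =>
      have hne : ¬ pvTripAt (a :: b :: c :: rest) 0 = true :=
        fun ht => hcond ((cond_iff_trip a b c rest).mpr ht)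
      simpa using hne
    | succ k =>
      rw [pvTripAt_succ]
      exact hmin k (by omega)
  | case3 t hnm =>
    intro h; cases h

-- membership of the triple string in pvTriples
theorem mk_triple_mem (c : Char) (hc : pvHexChar c = true) :
    String.ofList [c, c, c] ∈ pvTriples ∧ (String.ofList [c, c, c]).toList = [c, c, c] := by
  have hl : ("0123456789abcdef".toList) = ['0','1','2','3','4','5','6','7','8','9','a','b','c','d','e','f'] := by
    decide
  have hm : c ∈ ['0','1','2','3','4','5','6','7','8','9','a','b','c','d','e','f'] := by
    have := hc
    simp only [pvHexChar, hl] at this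
    simpa using this
  fin_cases hm <;> decide

theorem triple_of_mem (t : String) (ht : t ∈ pvTriples) :
    ∃ c, pvHexChar c = true ∧ t.toList = [c, c, c] := by
  simp only [pvTriples, List.mem_cons, List.not_mem_nil, or_false] at ht
  rcases ht with rfl|rfl|rfl|rfl|rfl|rfl|rfl|rfl|rfl|rfl|rfl|rfl|rfl|rfl|rfl|rfl
  · exact ⟨'0', by decide, by decide⟩
  · exact ⟨'1', by decide, by decide⟩
  · exact ⟨'2', by decide, by decide⟩
  · exact ⟨'3', by decide, by decide⟩
  · exact ⟨'4', by decide, by decide⟩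
  · exact ⟨'5', by decide, by decide⟩
  · exact ⟨'6', by decide, by decide⟩
  · exact ⟨'7', by decide, by decide⟩
  · exact ⟨'8', by decide, by decide⟩
  · exact ⟨'9', by decide, by decide⟩
  · exact ⟨'a', by decide, by decide⟩
  · exact ⟨'b', by decide, by decide⟩
  · exact ⟨'c', by decide, by decide⟩
  · exact ⟨'d', by decide, by decide⟩
  · exact ⟨'e', by decide, by decide⟩
  · exact ⟨'f', by decide, by decide⟩

theorem trip_of_find_nonneg (s : String) (t : String) (ht : t ∈ pvTriples)
    (h0 : 0 ≤ PySem.Chars.find s.toList t.toList) :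
    pvTripAt s.toList (PySem.Chars.find s.toList t.toList).toNat = true := by
  obtain ⟨c, hcx, htl⟩ := triple_of_mem t ht
  have hspec := (PySem.Chars.find_spec h0).1
  rw [pvTripAt_iff]
  exact ⟨c, hcx, htl ▸ hspec⟩

theorem unchanged_main (s : String) (h : ¬ D_find_three s) :
    find_three s = find_three_alt s := by
  rcases hb : pvScanB s.toList with _ | r
  · -- B returns none: no triple anywhere, so every find fails the update test
    have hall := (pvScanB_none_iff s.toList).mp hb
    have hfold : pvTriples.foldl (pvStepA s) (100, none) = (100, none) := by
      apply foldA_none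
      intro t ht hc
      have h0 : 0 ≤ PySem.Chars.find s.toList t.toList := by
        simpa using hc.1
      have := trip_of_find_nonneg s t ht h0
      rw [hall] at this
      cases this
    simp [find_three, find_three_alt, hfold, hb]
  · -- B returns some r
    obtain ⟨i, c, hcx, hp, hr, hmin⟩ := pvScanB_some s.toList r hb
    obtain ⟨hmem, htl⟩ := mk_triple_mem c hcx
    set t0 : String := String.ofList [c, c, c] with ht0
    -- the find of t0 equals i
    have hinf : [c, c, c] <:+: s.toList :=
      hp.isInfix.trans (List.drop_suffix i s.toList).isInfix
    have hg0 : 0 ≤ PySem.Chars.find s.toList t0.toList := by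
      rw [htl]
      exact (PySem.Chars.find_nonneg_iff _ _).mpr hinf
    have hspec := PySem.Chars.find_spec hg0
    have hk1 : i ≤ (PySem.Chars.find s.toList t0.toList).toNat := by
      by_contra hlt
      push_neg at hlt
      have := trip_of_find_nonneg s t0 hmem hg0
      rw [hmin _ hlt] at this
      cases this
    have hk2 : (PySem.Chars.find s.toList t0.toList).toNat ≤ i := by
      by_contra hlt
      push_neg at hlt
      exact hspec.2 i hlt (htl ▸ hp)
    have hgi : PySem.Chars.find s.toList t0.toList = (i : Int) := by
      have := Int.toNat_of_nonneg hg0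
      omega
    -- i < 100, else D_ would hold
    have hi100 : i < 100 := by
      by_contra hge
      push_neg at hge
      apply h
      constructor
      · intro j hj
        exact hmin j (by omega)
      · refine ⟨i, ?_, hge, (pvTripAt_iff s.toList i).mpr ⟨c, hcx, hp⟩⟩
        have : s.toList.drop i ≠ [] := by
          intro hnil
          rw [hnil] at hp
          simp [List.prefix_nil] at hp
        by_contra hlen
        push_neg at hlen
        rw [List.drop_eq_nil_of_le hlen] at this
        exact this rfl
    -- A's fold picks t0
    have hmin' : ∀ t ∈ pvTriples, 0 ≤ PySem.Str.find s t →
        PySem.Str.find s t0 ≤ PySem.Str.find s t := by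
      intro t ht hpos
      simp only [PySem.Str.find_eq] at hpos ⊢
      have htrip := trip_of_find_nonneg s t ht hpos
      have hge : i ≤ (PySem.Chars.find s.toList t.toList).toNat := by
        by_contra hlt
        push_neg at hlt
        rw [hmin _ hlt] at htrip
        cases htrip
      omega
    have hinj' : ∀ t ∈ pvTriples, PySem.Str.find s t = PySem.Str.find s t0 → t = t0 := by
      intro t ht heqf
      simp only [PySem.Str.find_eq] at heqf
      obtain ⟨c', hcx', htl'⟩ := triple_of_mem t ht
      have hpos : 0 ≤ PySem.Chars.find s.toList t.toList := by rw [heqf]; exact hg0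
      have hpre : t.toList <+: s.toList.drop i := by
        have := (PySem.Chars.find_spec hpos).1
        rwa [heqf, hgi, Int.toNat_natCast] at this
      have hlen : t.toList.length = ([c, c, c] : List Char).length := by
        rw [htl']; rfl
      have heql : t.toList = [c, c, c] :=
        List.IsPrefix.eq_of_length (List.prefix_of_prefix_length_le hpre hp (by rw [hlen])) hlen
      calc t = String.ofList t.toList := (String.ofList_toList (s := t)).symm
        _ = t0 := by rw [heql]
    have hfold := foldA_min s pvTriples 100 none t0 hmem
      (by simpa using hg0)
      (by simp only [PySem.Str.find_eq]; omega)
      hmin' hinj'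
    have hfind : PySem.Str.find s t0 = (i : Int) := by
      simp only [PySem.Str.find_eq]; omega
    rw [hfind] at hfold
    simp only [find_three, find_three_alt, hfold, hb, hr]
    rw [if_neg (by omega)]

theorem exact_main (s : String) (h : D_find_three s) :
    find_three s ≠ find_three_alt s := by
  obtain ⟨hlow, i, hilen, hi100, htrip⟩ := h
  have hfold : pvTriples.foldl (pvStepA s) (100, none) = (100, none) := by
    apply foldA_none
    intro t ht hc
    have h0 : 0 ≤ PySem.Chars.find s.toList t.toList := by simpa using hc.1
    have htr := trip_of_find_nonneg s t ht h0
    have hge : 100 ≤ (PySem.Chars.find s.toList t.toList).toNat := by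
      by_contra hlt
      push_neg at hlt
      rw [hlow _ hlt] at htr
      cases htr
    have hlt := hc.2
    simp only [PySem.Str.find_eq] at hlt
    omega
  have hA : find_three s = none := by
    simp [find_three, hfold]
  have hB : find_three_alt s ≠ none := by
    simp only [find_three_alt]
    intro hn
    have := (pvScanB_none_iff s.toList).mp hn i
    rw [htrip] at this
    cases this
  rw [hA]
  exact fun heq => hB heq.symm

-- ===== VERDICT =====
theorem find_three_spec : Claim_unchanged_find_three := by
  intro s _ hD
  exact unchanged_main s hD
set_option maxRecDepth 40000 in
theorem find_three_changed : Claim_changed_find_three := by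
  unfold Claim_changed_find_three; decide
theorem find_three_tight : Claim_exact_find_three := by
  intro s _ hD
  exact exact_main s hD
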